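-- pv_equiv track=rewrite | github.com/feirik/Writeups | guessing_game_4/solve.py | make_list_fourth
-- ===== SOURCE A (Python) =====
-- def make_list_fourth(false_count_list):
--     zero_false_list = []
--     one_false_list = []
--     two_false_list = []
--     three_false_list = []
--
--     iter = 0
--     for i in false_count_list:
--         if i == 0:
--             zero_false_list.append(iter)
--         if i == 1:
--             one_false_list.append(iter)
--         if i == 2:
--             two_false_list.append(iter)
--         if i == 3:
--             three_false_list.append(iter)
--         iter += 1
--
--     remove_zero = zero_false_list[0:256]
--     remove_one = one_false_list[:768]
--     remove_two = two_false_list[:768]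
--     remove_three = three_false_list[:256]
--
--     test_list = remove_zero + remove_one + remove_two + remove_three
--
--     return test_list
-- ===== SOURCE B (Python) =====
-- def make_list_fourth(false_count_list):
--     result = []
--     for v, cap in ((0, 256), (1, 768), (2, 768), (3, 256)):
--         result += [i for i, x in enumerate(false_count_list) if x == v][:cap]
--     return result
-- ===== Notes on version B (the rewrite author's own statement) =====
-- stated objective: simpler
-- what changed: Replaces the single interleaved pass that maintains four bucket lists, then slices and concatenates, by four independent filtering passes over enumerate, one per target value with its cap, appended in order.
import Mathlib
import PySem

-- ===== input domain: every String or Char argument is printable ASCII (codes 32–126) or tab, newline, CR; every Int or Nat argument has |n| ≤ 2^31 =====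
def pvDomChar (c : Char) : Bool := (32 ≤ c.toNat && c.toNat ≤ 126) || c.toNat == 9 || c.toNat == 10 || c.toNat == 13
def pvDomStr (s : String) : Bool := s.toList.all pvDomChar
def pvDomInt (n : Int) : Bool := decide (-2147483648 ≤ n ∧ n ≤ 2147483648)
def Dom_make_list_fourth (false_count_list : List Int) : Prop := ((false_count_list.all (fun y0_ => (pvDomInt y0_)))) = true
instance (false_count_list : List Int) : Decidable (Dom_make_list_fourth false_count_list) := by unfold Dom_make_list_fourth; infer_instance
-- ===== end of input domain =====

-- B replaces A's single interleaved bucketing pass (four accumulator lists built in one loop,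
-- then sliced and concatenated) by four independent filter-and-cap passes; objective: simpler.

-- ===== PORT A =====
-- the single loop of A, carrying the counter `iter` and the four bucket lists
def pvALoop (xs : List Int) (iter : Int) (z o t th : List Int) :
    List Int × List Int × List Int × List Int :=
  match xs with
  | [] => (z, o, t, th)
  | i :: rest =>
      pvALoop rest (iter + 1)
        (if i = 0 then z ++ [iter] else z)
        (if i = 1 then o ++ [iter] else o)
        (if i = 2 then t ++ [iter] else t)
        (if i = 3 then th ++ [iter] else th)

def make_list_fourth (false_count_list : List Int) : List Int :=
  let r := pvALoop false_count_list 0 [] [] [] []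
  PySem.List.slice r.1 (some 0) (some 256) ++
  PySem.List.slice r.2.1 none (some 768) ++
  PySem.List.slice r.2.2.1 none (some 768) ++
  PySem.List.slice r.2.2.2 none (some 256)

-- ===== PORT B =====
-- one independent pass: [i for i, x in enumerate(xs) if x == v][:cap]
def pvPick (xs : List Int) (v : Int) (cap : Int) : List Int :=
  PySem.List.slice (((PySem.List.enumerate xs 0).filter (fun p => p.2 == v)).map (·.1))
    none (some cap)

def make_list_fourth_alt (false_count_list : List Int) : List Int :=
  [((0 : Int), (256 : Int)), (1, 768), (2, 768), (3, 256)].foldl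
    (fun r p => r ++ pvPick false_count_list p.1 p.2) []

-- ===== PRECONDITION & SPEC =====
def Spec_make_list_fourth (false_count_list : List Int) (out : List Int) : Prop := out = make_list_fourth_alt false_count_list
instance (false_count_list : List Int) (out : List Int) : Decidable (Spec_make_list_fourth false_count_list out) := by unfold Spec_make_list_fourth; infer_instance

-- ===== CLAIM (what is proved, stated in full; the proofs are below) =====
def Claim_equal_make_list_fourth : Prop := ∀ (false_count_list : List Int), Dom_make_list_fourth false_count_list → Spec_make_list_fourth false_count_list (make_list_fourth false_count_list)

-- ===== LEMMAS AND PROOFS =====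

-- A's loop produces, onto each accumulator, exactly the filtered index list for its value
theorem pvALoop_eq (xs : List Int) : ∀ (iter : Int) (z o t th : List Int),
    pvALoop xs iter z o t th =
      (z ++ (((PySem.List.enumerate xs iter).filter (fun p => p.2 == (0 : Int))).map (·.1)),
       o ++ (((PySem.List.enumerate xs iter).filter (fun p => p.2 == (1 : Int))).map (·.1)),
       t ++ (((PySem.List.enumerate xs iter).filter (fun p => p.2 == (2 : Int))).map (·.1)),
       th ++ (((PySem.List.enumerate xs iter).filter (fun p => p.2 == (3 : Int))).map (·.1))) := by
  induction xs with
  | nil => intro iter z o t th; simp [pvALoop, PySem.List.enumerate_nil]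
  | cons i rest ih =>
      intro iter z o t th
      rw [pvALoop, ih, PySem.List.enumerate_cons]
      simp only [List.filter_cons]
      by_cases h0 : i = 0 <;> by_cases h1 : i = 1 <;> by_cases h2 : i = 2 <;>
        by_cases h3 : i = 3 <;>
        simp_all [List.append_assoc]

-- ===== VERDICT (by name: the statement is the Claim_ definition above) =====
theorem make_list_fourth_spec : Claim_equal_make_list_fourth := by
  intro xs _
  unfold Spec_make_list_fourth make_list_fourth make_list_fourth_alt
  rw [pvALoop_eq]
  simp [pvPick, List.foldl, List.append_assoc]
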